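-- pv_equiv track=rewrite | github.com/stavros11/Time-Evolution | optimization/optimize.py | level_generator
-- ===== SOURCE A (Python) =====
-- from typing import Callable, Dict, List, Optional, Union, Tuple
--
-- def level_generator(n: int) -> List[int]:
--   """Helper method for `tree`.
--
--   Assumes `n` is a power of 2.
--   """
--   # Assumes n is a power of 2.
--   left = list(range(0, n // 2))
--   right = list(range(n // 2, n))
--   while len(left) != 1:
--     yield left + right
--     left = left[::2]
--     right = right[1::2]
--   yield left + right
-- ===== SOURCE B (Python) =====
-- def level_generator(n):
--   """Helper method for `tree`.
--
--   Assumes `n` is a power of 2.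
--   """
--   # Closed-form per-level ranges: level k's left half is range(0, m, 2**k)
--   # and its right half starts at m + 2**k - 1; the number of levels is
--   # determined up front from the bit length of m - 1.
--   m = n // 2
--   K = (m - 1).bit_length()
--   for k in range(K + 1):
--     s = 1 << k
--     yield list(range(0, m, s)) + list(range(m + s - 1, n, s))
-- ===== Notes on version B (the rewrite author's own statement) =====
-- stated objective: alternative
-- what changed: B replaces A's while-loop that repeatedly refines stateful left/right lists by step-2 slicing with a stateless for-loop over a level count computed up front from (n//2-1).bit_length(), emitting each level directly as two closed-form ranges range(0,m,2**k) and range(m+2**k-1,n,2**k).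
-- outside the precondition, e.g. on level_generator(0): A does not finish within the time limit, B returns [[], []]; on level_generator(1): A does not finish within the time limit, B returns [[0], []]
import Mathlib
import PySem

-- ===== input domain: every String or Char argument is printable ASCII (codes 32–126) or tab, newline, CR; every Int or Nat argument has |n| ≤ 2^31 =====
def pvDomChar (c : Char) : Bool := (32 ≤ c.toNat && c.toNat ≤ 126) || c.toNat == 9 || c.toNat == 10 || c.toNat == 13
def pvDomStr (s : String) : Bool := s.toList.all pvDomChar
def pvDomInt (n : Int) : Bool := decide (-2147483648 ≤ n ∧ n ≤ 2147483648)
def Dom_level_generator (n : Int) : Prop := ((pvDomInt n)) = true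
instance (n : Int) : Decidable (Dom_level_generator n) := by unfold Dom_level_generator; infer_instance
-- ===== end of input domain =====

-- B replaces A's stateful slice-refinement while-loop by a stateless for-loop over a
-- precomputed level count, emitting each level as two closed-form ranges (objective: alternative).

-- ===== PORT A =====
-- Hand-ported step-2 slice (PySem.List.slice? covers it, but this structural form is the
-- literal meaning): every2 xs = xs[::2] (indices 0,2,4,…); xs[1::2] = every2 (xs.drop 1).
def every2 {α : Type} : List α → List α
  | [] => []
  | x :: xs => x :: every2 (xs.drop 1)
termination_by l => l.length
decreasing_by simp

-- cited by loopA's decreasing_by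
theorem length_every2 {α : Type} : ∀ l : List α, (every2 l).length = (l.length + 1) / 2
  | [] => by rw [every2]; simp
  | x :: xs => by
      rw [every2, List.length_cons, length_every2 (xs.drop 1)]
      simp; omega
termination_by l => l.length
decreasing_by simp

-- the while-loop of A; the second branch is Python's non-termination (empty left never
-- reaches length 1): unreachable under Pre_level_generator
def loopA (left right : List Int) (acc : List (List Int)) : List (List Int) :=
  if _h1 : left.length = 1 then acc ++ [left ++ right]
  else if _h0 : left.length = 0 then acc
  else loopA (every2 left) (every2 (right.drop 1)) (acc ++ [left ++ right])
termination_by left.length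
decreasing_by rw [length_every2]; omega

def level_generator (n : Int) : List (List Int) :=
  loopA (PySem.List.pyRange 0 (PySem.Int.floordiv n 2) 1)
        (PySem.List.pyRange (PySem.Int.floordiv n 2) n 1) []

-- ===== PORT B =====
def level_generator_alt (n : Int) : List (List Int) :=
  let m := PySem.Int.floordiv n 2
  let K := PySem.Int.bitLength (m - 1)
  (List.range (K + 1)).map (fun k =>
    let s : Int := 2 ^ k
    PySem.List.pyRange 0 m s ++ PySem.List.pyRange (m + s - 1) n s)

-- ===== PRECONDITION & SPEC =====
-- For n ≤ 1 the Python A is an infinite generator (left stays empty, never of length 1),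
-- so A returns no finite value there; Pre_ excludes exactly those inputs.
def Pre_level_generator (n : Int) : Prop := 2 ≤ n
instance (n : Int) : Decidable (Pre_level_generator n) := by unfold Pre_level_generator; infer_instance
def pvWitness_level_generator : Int := (8)

def Spec_level_generator (n : Int) (out : List (List Int)) : Prop := out = level_generator_alt n
instance (n : Int) (out : List (List Int)) : Decidable (Spec_level_generator n out) := by unfold Spec_level_generator; infer_instance

-- ===== CLAIM (what is proved, stated in full; the proofs are below) =====
def Claim_equal_level_generator : Prop := ∀ (n : Int), Dom_level_generator n → Pre_level_generator n → Spec_level_generator n (level_generator n)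

-- ===== LEMMAS AND PROOFS =====

theorem pyRange_pos_nil {s : Int} (hs : 0 < s) (a b : Int) (h : b ≤ a) :
    PySem.List.pyRange a b s = [] := by
  rw [PySem.List.pyRange_of_pos a b hs]
  simp [not_lt.mpr h]

theorem pyRange_pos_cons {s : Int} (hs : 0 < s) {a b : Int} (h : a < b) :
    PySem.List.pyRange a b s = a :: PySem.List.pyRange (a + s) b s := by
  have hc : (b - a + s - 1) / s = (b - a - 1) / s + 1 := by
    have := Int.add_mul_ediv_right (b - a - 1) 1 (ne_of_gt hs)
    have e : b - a + s - 1 = b - a - 1 + 1 * s := by ring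
    rw [e, this]
  have hq0 : 0 ≤ (b - a - 1) / s := Int.ediv_nonneg (by omega) (le_of_lt hs)
  rw [PySem.List.pyRange_of_pos a b hs, PySem.List.pyRange_of_pos (a + s) b hs]
  simp only [if_pos h, hc]
  have ht : ((b - a - 1) / s + 1).toNat = ((b - a - 1) / s).toNat + 1 := by omega
  rw [ht, List.range_succ_eq_map, List.map_cons, List.map_map]
  congr 1
  · simp
  · by_cases h2 : a + s < b
    · rw [if_pos h2]
      have e2 : b - (a + s) + s - 1 = b - a - 1 := by ring
      rw [e2]
      apply List.map_congr_left
      intro k _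
      simp [Function.comp, Nat.succ_eq_add_one]
      ring
    · rw [if_neg h2]
      have hz : (b - a - 1) / s = 0 := Int.ediv_eq_zero_of_lt (by omega) (by omega)
      simp [hz]

theorem pyRange_pos_tail {s : Int} (hs : 0 < s) (a b : Int) :
    (PySem.List.pyRange a b s).drop 1 = PySem.List.pyRange (a + s) b s := by
  by_cases h : a < b
  · rw [pyRange_pos_cons hs h]; rfl
  · rw [pyRange_pos_nil hs _ _ (not_lt.mp h), pyRange_pos_nil hs _ _ (by omega)]; rfl

theorem every2_pyRange {s : Int} (hs : 0 < s) :
    ∀ (N : Nat) (a b : Int), (b - a).toNat ≤ N →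
    every2 (PySem.List.pyRange a b s) = PySem.List.pyRange a b (2 * s) := by
  intro N
  induction N with
  | zero =>
    intro a b h
    have hba : b ≤ a := by omega
    rw [pyRange_pos_nil hs _ _ hba, pyRange_pos_nil (by omega) _ _ hba, every2]
  | succ N ih =>
    intro a b h
    by_cases hab : a < b
    · rw [pyRange_pos_cons hs hab, every2, pyRange_pos_tail hs,
        ih (a + s + s) b (by omega), pyRange_pos_cons (by omega : (0:Int) < 2 * s) hab]
      have e : a + s + s = a + 2 * s := by ring
      rw [e]
    · rw [pyRange_pos_nil hs _ _ (not_lt.mp hab), pyRange_pos_nil (by omega) _ _ (not_lt.mp hab), every2]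

theorem length_pyRange_pos {s : Int} (hs : 0 < s) (m : Int) (hm : 0 < m) :
    (PySem.List.pyRange 0 m s).length = ((m - 1) / s).toNat + 1 := by
  rw [PySem.List.pyRange_of_pos _ _ hs]
  simp only [List.length_map, List.length_range, if_pos hm]
  have hc : (m - 0 + s - 1) / s = (m - 1) / s + 1 := by
    have h1 := Int.add_mul_ediv_right (m - 1) 1 (ne_of_gt hs)
    have e : m - 0 + s - 1 = m - 1 + 1 * s := by ring
    rw [e, h1]
  have hq0 : 0 ≤ (m - 1) / s := Int.ediv_nonneg (by omega) (le_of_lt hs)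
  omega

-- bit-length brackets: for 1 ≤ m, m ≤ 2^bitLength(m-1) and 2^k ≤ m-1 whenever k < bitLength(m-1)
theorem le_two_pow_bitLength (m : Int) (hm : 1 ≤ m) :
    m ≤ (2 : Int) ^ (PySem.Int.bitLength (m - 1)) := by
  have h := PySem.Int.lt_two_pow_bitLength (m - 1)
  have h2 : ((m - 1).natAbs : Int) < (2 : Int) ^ (PySem.Int.bitLength (m - 1)) := by
    exact_mod_cast h
  rw [Int.natAbs_of_nonneg (by omega)] at h2
  omega

theorem two_pow_le_of_lt_bitLength (m : Int) (hm : 1 ≤ m) (k : Nat)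
    (hk : k < PySem.Int.bitLength (m - 1)) : (2 : Int) ^ k ≤ m - 1 := by
  have hne : m - 1 ≠ 0 := by
    intro h0
    rw [h0] at hk
    simp [PySem.Int.bitLength_zero] at hk
  have h := PySem.Int.two_pow_bitLength_le (m - 1) hne
  have hmono : (2 : Nat) ^ k ≤ 2 ^ (PySem.Int.bitLength (m - 1) - 1) :=
    Nat.pow_le_pow_right (by omega) (by omega)
  have h2 : (2 : Int) ^ k ≤ ((m - 1).natAbs : Int) := by exact_mod_cast le_trans hmono h
  rw [Int.natAbs_of_nonneg (by omega)] at h2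
  omega

theorem drop_range_succ (K k : Nat) (hk : k < K + 1) :
    (List.range (K + 1)).drop k = k :: (List.range (K + 1)).drop (k + 1) := by
  rw [List.drop_eq_getElem_cons (by simpa using hk)]
  simp

theorem loopA_closed (m n : Int) (hm : 1 ≤ m) :
    ∀ (j k : Nat), k + j = PySem.Int.bitLength (m - 1) →
    ∀ acc : List (List Int),
    loopA (PySem.List.pyRange 0 m (2 ^ k)) (PySem.List.pyRange (m + 2 ^ k - 1) n (2 ^ k)) acc
      = acc ++ ((List.range (PySem.Int.bitLength (m - 1) + 1)).drop k).map
          (fun k => PySem.List.pyRange 0 m ((2 : Int) ^ k) ++ PySem.List.pyRange (m + 2 ^ k - 1) n (2 ^ k)) := by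
  intro j
  induction j with
  | zero =>
    intro k hk acc
    have hK : k = PySem.Int.bitLength (m - 1) := by omega
    have hs : (0:Int) < 2 ^ k := by positivity
    have hle : m ≤ 2 ^ k := by rw [hK]; exact le_two_pow_bitLength m hm
    have hz : (m - 1) / 2 ^ k = 0 := Int.ediv_eq_zero_of_lt (by omega) (by omega)
    have hlen : (PySem.List.pyRange 0 m (2 ^ k)).length = 1 := by
      rw [length_pyRange_pos hs m (by omega), hz]; rfl
    rw [loopA, dif_pos hlen, ← hK, drop_range_succ _ _ (by omega)]
    have hd : (List.range (k + 1)).drop (k + 1) = [] := by simp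
    rw [hd]
    simp
  | succ j ih =>
    intro k hk acc
    have hs : (0:Int) < 2 ^ k := by positivity
    have hlt : (2:Int) ^ k ≤ m - 1 := two_pow_le_of_lt_bitLength m hm k (by omega)
    have hge1 : 1 ≤ (m - 1) / 2 ^ k := by
      rw [Int.le_ediv_iff_mul_le hs]; omega
    have hlen : (PySem.List.pyRange 0 m (2 ^ k)).length = ((m - 1) / 2 ^ k).toNat + 1 :=
      length_pyRange_pos hs m (by omega)
    have hE1 : every2 (PySem.List.pyRange 0 m (2 ^ k)) = PySem.List.pyRange 0 m (2 ^ (k + 1)) := by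
      rw [every2_pyRange hs m.toNat 0 m (by omega)]
      congr 1
      ring
    have hE2 : every2 ((PySem.List.pyRange (m + 2 ^ k - 1) n (2 ^ k)).drop 1)
        = PySem.List.pyRange (m + 2 ^ (k + 1) - 1) n (2 ^ (k + 1)) := by
      rw [pyRange_pos_tail hs,
        every2_pyRange hs (n - (m + 2 ^ k - 1 + 2 ^ k)).toNat _ _ (le_refl _)]
      congr 1 <;> ring
    rw [loopA, dif_neg (by rw [hlen]; omega), dif_neg (by rw [hlen]; omega), hE1, hE2,
      ih (k + 1) (by omega) _, drop_range_succ _ k (by omega)]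
    simp

-- ===== VERDICT (by name: the statement is the Claim_ definition above) =====
theorem level_generator_spec : Claim_equal_level_generator := by
  intro n _ hpre
  unfold Pre_level_generator at hpre
  unfold Spec_level_generator level_generator level_generator_alt
  have hmf : PySem.Int.floordiv n 2 = n / 2 := PySem.Int.floordiv_eq_ediv_of_pos (by omega)
  set m := PySem.Int.floordiv n 2 with hm
  have hm1 : 1 ≤ m := by rw [hmf]; omega
  have h0 : PySem.List.pyRange 0 m 1 = PySem.List.pyRange 0 m ((2:Int) ^ (0:Nat)) := by norm_num
  have h1 : PySem.List.pyRange m n 1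
      = PySem.List.pyRange (m + (2:Int) ^ (0:Nat) - 1) n ((2:Int) ^ (0:Nat)) := by norm_num
  rw [h0, h1, loopA_closed m n hm1 (PySem.Int.bitLength (m - 1)) 0 (by omega) []]
  simp
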